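-- pv_equiv track=rewrite | github.com/PandaBoots/Reddit-Hot-Multireddit-Downloader | frontpagedownloader3.0.py | fileinputvalidation
-- ===== SOURCE A (Python) =====
-- def fileinputvalidation(inputstr):
--     bannedchars ={
--         "\\": " ",
--         "/": " ",
--         "?": '.',
--         "!": '.',
--         "\"": '..',
--         "\'": "..",
--         ">": "-",
--         "<": "-",
--         "*": "aesterisk",
--         '|': 'pipechar',
--         ':': 'COLON',
--         ';': 'semicolon'}
--
--     for character in bannedchars.keys():
--         inputstr = inputstr.replace(character, bannedchars[character])
--
--     return inputstr
-- ===== SOURCE B (Python) =====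
-- def fileinputvalidation(inputstr):
--     table = {ord("\\"): " ", ord("/"): " ", ord("?"): ".", ord("!"): ".",
--              ord("\""): "..", ord("\'"): "..", ord(">"): "-", ord("<"): "-",
--              ord("*"): "aesterisk", ord("|"): "pipechar",
--              ord(":"): "COLON", ord(";"): "semicolon"}
--     return inputstr.translate(table)
-- ===== Notes on version B (the rewrite author's own statement) =====
-- stated objective: idiomatic
-- what changed: Replaces twelve sequential full-string str.replace passes with one str.translate pass over a single translation table (safe because no substitute contains a banned character).
import Mathlib
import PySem

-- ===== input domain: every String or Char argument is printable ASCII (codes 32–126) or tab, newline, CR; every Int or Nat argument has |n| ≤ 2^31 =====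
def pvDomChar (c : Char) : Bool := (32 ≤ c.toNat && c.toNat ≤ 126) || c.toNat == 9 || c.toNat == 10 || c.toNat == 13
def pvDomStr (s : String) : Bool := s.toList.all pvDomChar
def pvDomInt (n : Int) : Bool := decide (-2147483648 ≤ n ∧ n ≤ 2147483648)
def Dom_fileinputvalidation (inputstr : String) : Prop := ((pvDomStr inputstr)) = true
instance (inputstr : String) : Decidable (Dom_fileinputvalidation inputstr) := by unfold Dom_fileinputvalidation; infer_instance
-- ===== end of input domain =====

-- B replaces A's twelve sequential full-string replace passes with a single translation-table pass (str.translate); return values are identical.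
-- ===== PORT A =====
-- A replaces each banned character in turn with twelve sequential full-string replace passes.
def fileinputvalidation (inputstr : String) : String :=
  let s1 := PySem.Str.replace inputstr "\\" " "
  let s2 := PySem.Str.replace s1 "/" " "
  let s3 := PySem.Str.replace s2 "?" "."
  let s4 := PySem.Str.replace s3 "!" "."
  let s5 := PySem.Str.replace s4 "\"" ".."
  let s6 := PySem.Str.replace s5 "'" ".."
  let s7 := PySem.Str.replace s6 ">" "-"
  let s8 := PySem.Str.replace s7 "<" "-"
  let s9 := PySem.Str.replace s8 "*" "aesterisk"
  let s10 := PySem.Str.replace s9 "|" "pipechar"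
  let s11 := PySem.Str.replace s10 ":" "COLON"
  let s12 := PySem.Str.replace s11 ";" "semicolon"
  s12

-- ===== PORT B =====
-- B builds one translation table and makes a single pass (str.translate); the table lookup is pvSub.
def pvSub (ch : Char) : List Char :=
  if ch = '\\' then [' ']
  else if ch = '/' then [' ']
  else if ch = '?' then ['.']
  else if ch = '!' then ['.']
  else if ch = '"' then ['.', '.']
  else if ch = '\'' then ['.', '.']
  else if ch = '>' then ['-']
  else if ch = '<' then ['-']
  else if ch = '*' then "aesterisk".toList
  else if ch = '|' then "pipechar".toList
  else if ch = ':' then "COLON".toList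
  else if ch = ';' then "semicolon".toList
  else [ch]

def fileinputvalidation_alt (inputstr : String) : String :=
  String.ofList (inputstr.toList.flatMap pvSub)


-- ===== PRECONDITION & SPEC =====
def Spec_fileinputvalidation (inputstr : String) (out : String) : Prop := out = fileinputvalidation_alt inputstr
instance (inputstr : String) (out : String) : Decidable (Spec_fileinputvalidation inputstr out) := by unfold Spec_fileinputvalidation; infer_instance

-- ===== CLAIM (what is proved, stated in full; the proofs are below) =====
def Claim_equal_fileinputvalidation : Prop := ∀ (inputstr : String), Dom_fileinputvalidation inputstr → Spec_fileinputvalidation inputstr (fileinputvalidation inputstr)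

-- ===== LEMMAS AND PROOFS =====

-- ===== VERDICT (by name: the statement is the Claim_ definition above) =====


-- fuel-based unfolding of PySem.Chars.replace.go for a single-character pattern
lemma pv_go_single (c : Char) (new : List Char) :
    ∀ fuel l acc, l.length ≤ fuel →
      PySem.Chars.replace.go [c] new fuel l acc
        = acc.reverse ++ l.flatMap (fun ch => if ch = c then new else [ch]) := by
  intro fuel
  induction fuel with
  | zero => intro l acc h; cases l with
    | nil => simp [PySem.Chars.replace.go]
    | cons a t => simp at h
  | succ n ih =>
    intro l acc h
    cases l with
    | nil => simp [PySem.Chars.replace.go]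
    | cons a t =>
      simp only [PySem.Chars.replace.go]
      by_cases hac : a = c
      · subst hac
        rw [if_pos (by simp [List.isPrefixOf])]
        rw [ih _ _ (by simpa using Nat.le_of_succ_le_succ h)]
        simp
      · rw [if_neg (by simp [List.isPrefixOf]; exact fun h2 => hac h2.symm)]
        rw [ih _ _ (by simpa using Nat.le_of_succ_le_succ h)]
        simp [hac]

-- replacing a single-character pattern is a character-wise flatMap
lemma pv_rep_single (c : Char) (new : List Char) (l : List Char) :
    PySem.Chars.replace l [c] new = l.flatMap (fun ch => if ch = c then new else [ch]) := by
  simp only [PySem.Chars.replace, List.isEmpty]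
  rw [pv_go_single c new l.length l [] le_rfl]
  simp

set_option maxRecDepth 4096 in
theorem pv_main (s : String) : fileinputvalidation s = fileinputvalidation_alt s := by
  apply String.toList_inj.mp
  unfold fileinputvalidation fileinputvalidation_alt
  simp only [PySem.Str.toList_replace]
  simp only [show ("\\" : String).toList = ['\\'] from rfl, show ("/" : String).toList = ['/'] from rfl, show ("?" : String).toList = ['?'] from rfl, show ("!" : String).toList = ['!'] from rfl, show ("\"" : String).toList = ['\"'] from rfl, show ("'" : String).toList = ['\''] from rfl, show (">" : String).toList = ['>'] from rfl, show ("<" : String).toList = ['<'] from rfl, show ("*" : String).toList = ['*'] from rfl, show ("|" : String).toList = ['|'] from rfl, show (":" : String).toList = [':'] from rfl, show (";" : String).toList = [';'] from rfl]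
  simp only [pv_rep_single, List.flatMap_assoc, String.toList_ofList]
  apply List.flatMap_congr
  intro ch _
  by_cases h1 : ch = '\\'; · subst h1; decide
  by_cases h2 : ch = '/'; · subst h2; decide
  by_cases h3 : ch = '?'; · subst h3; decide
  by_cases h4 : ch = '!'; · subst h4; decide
  by_cases h5 : ch = '"'; · subst h5; decide
  by_cases h6 : ch = '\''; · subst h6; decide
  by_cases h7 : ch = '>'; · subst h7; decide
  by_cases h8 : ch = '<'; · subst h8; decide
  by_cases h9 : ch = '*'; · subst h9; decide
  by_cases h10 : ch = '|'; · subst h10; decide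
  by_cases h11 : ch = ':'; · subst h11; decide
  by_cases h12 : ch = ';'; · subst h12; decide
  simp [pvSub, h1, h2, h3, h4, h5, h6, h7, h8, h9, h10, h11, h12]

theorem fileinputvalidation_spec : Claim_equal_fileinputvalidation := by
  intro s _
  unfold Spec_fileinputvalidation
  exact pv_main s
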